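-- pv_equiv track=rewrite | github.com/MirMXZhao/UROP_2025 | filtration_manual/removeBody.py | allBracePairs
-- ===== SOURCE A (Python) =====
-- def allBracePairs(text, filename):
--     stack = []
--     pairs = []
--
--     for i, c in enumerate(text):
--         if c == '{':
--             stack.append(i)
--         elif c == '}':
--             if not stack:
--                 return None
--             start = stack.pop()
--             # Only add pair if it's top-level (i.e., when stack is empty *after* popping)
--             if not stack:
--                 pairs.append((start, i))
--     return pairs
-- ===== SOURCE B (Python) =====
-- def allBracePairs(text, filename):
--     # Recursive descent: a matcher consumes one brace group and reports the
--     # index of the close matching a given open; the top-level loop pairs each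
--     # top-level '{' with that close, rejects a stray '}', and stops silently
--     # on a trailing unmatched '{' (leftover opens are ignored, as in A).
--     n = len(text)
--
--     def match_close(i):
--         # scan for the '}' matching the '{' just before position i;
--         # return its index, or None if the text ends first
--         while i < n:
--             c = text[i]
--             if c == '}':
--                 return i
--             if c == '{':
--                 j = match_close(i + 1)
--                 if j is None:
--                     return None
--                 i = j + 1
--             else:
--                 i += 1
--         return None
--
--     pairs = []
--     i = 0
--     while i < n:
--         c = text[i]
--         if c == '}':
--             return None
--         if c == '{':
--             j = match_close(i + 1)
--             if j is None:
--                 return pairs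
--             pairs.append((i, j))
--             i = j + 1
--         else:
--             i += 1
--     return pairs
-- ===== Notes on version B (the rewrite author's own statement) =====
-- stated objective: alternative
-- what changed: Replaces the single stack-driven scan with a recursive descent parser: an inner matcher recursively consumes one nested brace group and returns the index of the matching close, and a top-level loop pairs each top-level '{' with that close; no stack or depth counter is maintained.
import Mathlib
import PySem

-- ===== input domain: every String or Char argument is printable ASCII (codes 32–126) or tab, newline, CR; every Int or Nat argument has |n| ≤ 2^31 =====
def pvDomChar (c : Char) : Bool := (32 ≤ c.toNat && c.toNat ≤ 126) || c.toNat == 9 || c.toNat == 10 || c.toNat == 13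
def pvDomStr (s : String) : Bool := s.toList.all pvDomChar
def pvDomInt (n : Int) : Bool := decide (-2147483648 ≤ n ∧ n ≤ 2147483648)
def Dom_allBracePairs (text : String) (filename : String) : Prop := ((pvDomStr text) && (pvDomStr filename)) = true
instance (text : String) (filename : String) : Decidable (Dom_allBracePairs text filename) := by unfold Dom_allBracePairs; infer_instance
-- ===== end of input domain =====

-- B replaces A's stack-driven scan with a recursive descent parser (inner matcher + top-level loop); same cost, different decomposition.

-- ===== PORT A =====
-- the Python stack is kept head-is-top (append = cons, pop = head); `i` is the enumerate index
def allBracePairsGoA : List Char → Int → List Int → List (Int × Int) → Option (List (Int × Int))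
  | [], _, _, pairs => some pairs
  | c :: rest, i, stack, pairs =>
    if c = '{' then allBracePairsGoA rest (i + 1) (i :: stack) pairs
    else if c = '}' then
      match stack with
      | [] => none
      | start :: stack' =>
        if stack' = [] then allBracePairsGoA rest (i + 1) stack' (pairs ++ [(start, i)])
        else allBracePairsGoA rest (i + 1) stack' pairs
    else allBracePairsGoA rest (i + 1) stack pairs

def allBracePairs (text : String) (filename : String) : Option (List (Int × Int)) :=
  allBracePairsGoA text.toList 0 [] []

-- ===== PORT B =====
-- Source B's match_close: cs are the characters from position i on; returns the index of the
-- '}' matching the '{' just before, together with the characters after it (the Python keeps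
-- scanning the same string by index; the port carries the suffix, with its length bound so
-- that the recursion is visibly terminating).
def allBracePairsMC : (cs : List Char) → Int → Option (Int × {l : List Char // l.length < cs.length})
  | [], _ => none
  | c :: rest, i =>
    if c = '}' then some (i, ⟨rest, by simp⟩)
    else if c = '{' then
      match allBracePairsMC rest (i + 1) with
      | none => none
      | some (j, ⟨rest', h⟩) =>
        match allBracePairsMC rest' (j + 1) with
        | none => none
        | some (k, ⟨rest'', h2⟩) => some (k, ⟨rest'', by simp; omega⟩)
    else
      match allBracePairsMC rest (i + 1) with
      | none => none
      | some (j, ⟨rest', h⟩) => some (j, ⟨rest', by simp; omega⟩)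
termination_by cs => cs.length
decreasing_by all_goals (simp_all; try omega)

-- Source B's top-level while loop
def allBracePairsTop : (cs : List Char) → Int → List (Int × Int) → Option (List (Int × Int))
  | [], _, pairs => some pairs
  | c :: rest, i, pairs =>
    if c = '}' then none
    else if c = '{' then
      match allBracePairsMC rest (i + 1) with
      | none => some pairs
      | some (j, ⟨rest', h⟩) => allBracePairsTop rest' (j + 1) (pairs ++ [(i, j)])
    else allBracePairsTop rest (i + 1) pairs
termination_by cs => cs.length
decreasing_by all_goals (simp_all; try omega)

def allBracePairs_alt (text : String) (filename : String) : Option (List (Int × Int)) :=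
  allBracePairsTop text.toList 0 []

-- ===== PRECONDITION & SPEC =====
def Spec_allBracePairs (text : String) (filename : String) (out : Option (List (Int × Int))) : Prop := out = allBracePairs_alt text filename
instance (text : String) (filename : String) (out : Option (List (Int × Int))) : Decidable (Spec_allBracePairs text filename out) := by unfold Spec_allBracePairs; infer_instance

-- ===== CLAIM (what is proved, stated in full; the proofs are below) =====
def Claim_equal_allBracePairs : Prop := ∀ (text : String) (filename : String), Dom_allBracePairs text filename → Spec_allBracePairs text filename (allBracePairs text filename)

-- ===== LEMMAS AND PROOFS =====

-- A's scan with a nonempty stack, up to the close matching the stack's top: if the matcher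
-- fails, the top is never popped, so no pair is appended and A returns the pairs so far;
-- if it finds (j, rest'), A continues past j with the top popped (recording the pair when
-- the stack empties).
theorem lemM : ∀ (n : ℕ) (cs : List Char), cs.length ≤ n →
    ∀ (i s : Int) (ss : List Int) (pairs : List (Int × Int)),
      allBracePairsGoA cs i (s :: ss) pairs =
        match allBracePairsMC cs i with
        | none => some pairs
        | some (j, ⟨rest', _⟩) =>
          if ss = [] then allBracePairsGoA rest' (j + 1) [] (pairs ++ [(s, j)])
          else allBracePairsGoA rest' (j + 1) ss pairs := by
  intro n
  induction n with
  | zero =>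
    intro cs hlen i s ss pairs
    have : cs = [] := List.eq_nil_of_length_eq_zero (Nat.le_zero.mp hlen)
    subst this; rw [allBracePairsMC]; rfl
  | succ n ih =>
    intro cs hlen i s ss pairs
    cases cs with
    | nil => rw [allBracePairsMC]; rfl
    | cons c rest =>
      simp only [List.length_cons, Nat.succ_le_succ_iff] at hlen
      by_cases hbl : c = '{'
      · subst hbl
        rw [allBracePairsGoA, if_pos rfl, allBracePairsMC]
        rw [if_neg (by decide), if_pos rfl]
        rw [ih rest hlen (i + 1) i (s :: ss) pairs]
        cases h1 : allBracePairsMC rest (i + 1) with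
        | none => rfl
        | some v =>
          obtain ⟨j, rest', hlt⟩ := v
          simp only [reduceCtorEq]
          rw [ih rest' (by omega) (j + 1) s ss pairs]
          cases h2 : allBracePairsMC rest' (j + 1) with
          | none => rfl
          | some w => obtain ⟨k, rest'', hlt2⟩ := w; rfl
      · by_cases hbr : c = '}'
        · subst hbr
          rw [allBracePairsGoA, if_neg (by decide), if_pos rfl, allBracePairsMC, if_pos rfl]
          by_cases he : ss = []
          · subst he; simp
          · simp [he]
        · rw [allBracePairsGoA, if_neg hbl, if_neg hbr,
            ih rest hlen (i + 1) s ss pairs, allBracePairsMC, if_neg hbr, if_neg hbl]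
          cases h1 : allBracePairsMC rest (i + 1) with
          | none => rfl
          | some v => obtain ⟨j, rest', hlt⟩ := v; rfl

-- A's scan with an empty stack is B's top-level loop.
theorem lemT : ∀ (n : ℕ) (cs : List Char), cs.length ≤ n →
    ∀ (i : Int) (pairs : List (Int × Int)),
      allBracePairsGoA cs i [] pairs = allBracePairsTop cs i pairs := by
  intro n
  induction n with
  | zero =>
    intro cs hlen i pairs
    have : cs = [] := List.eq_nil_of_length_eq_zero (Nat.le_zero.mp hlen)
    subst this; rw [allBracePairsTop]; rfl
  | succ n ih =>
    intro cs hlen i pairs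
    cases cs with
    | nil => rw [allBracePairsTop]; rfl
    | cons c rest =>
      simp only [List.length_cons, Nat.succ_le_succ_iff] at hlen
      by_cases hbl : c = '{'
      · subst hbl
        rw [allBracePairsGoA, if_pos rfl, allBracePairsTop, if_neg (by decide), if_pos rfl]
        rw [lemM rest.length rest le_rfl (i + 1) i [] pairs]
        cases h1 : allBracePairsMC rest (i + 1) with
        | none => rfl
        | some v =>
          obtain ⟨j, rest', hlt⟩ := v
          exact ih rest' (by omega) (j + 1) (pairs ++ [(i, j)])
      · by_cases hbr : c = '}'
        · subst hbr
          rw [allBracePairsGoA, if_neg (by decide), if_pos rfl, allBracePairsTop, if_pos rfl]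
        · rw [allBracePairsGoA, if_neg hbl, if_neg hbr,
            allBracePairsTop, if_neg hbr, if_neg hbl]
          exact ih rest hlen (i + 1) pairs

-- ===== VERDICT (by name: the statement is the Claim_ definition above) =====
theorem allBracePairs_spec : Claim_equal_allBracePairs := by
  intro text filename _
  unfold Spec_allBracePairs allBracePairs allBracePairs_alt
  exact lemT text.toList.length text.toList le_rfl 0 []
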